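-- pv_equiv track=rewrite | github.com/taeyoung0823/Algorithm | 프로그래머스/2/131127. 할인 행사/할인 행사.py | solution
-- ===== SOURCE A (Python) =====
-- def solution(want, number, discount):
--     count = 0
--     want_dict = {want[i]: number[i] for i in range(len(want))}
--
--     for i in range(len(discount)-9):
--         disc_item = discount[i:i+10]
--         disc_list = {}
--
--         for item in disc_item:
--             if item in disc_list:
--                 disc_list[item] += 1
--             else:
--                 disc_list[item] = 1
--
--         if all(disc_list.get(item, 0) >= want_dict[item] for item in want_dict):
--             count +=1
--
--     return count
-- ===== SOURCE B (Python) =====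
-- def solution(want, number, discount):
--     need = {}
--     for w, n in zip(want, number):
--         need[w] = n
--     target = len(need)
--     satisfied = 0
--     for v in need.values():
--         if v <= 0:
--             satisfied += 1
--     cnt = {}
--     count = 0
--     for j, item in enumerate(discount):
--         if item in need:
--             c = cnt.get(item, 0) + 1
--             cnt[item] = c
--             if c == need[item]:
--                 satisfied += 1
--         if j >= 10:
--             old = discount[j - 10]
--             if old in need:
--                 c = cnt.get(old, 0) - 1
--                 cnt[old] = c
--                 if c == need[old] - 1:
--                     satisfied -= 1
--         if j >= 9 and satisfied == target:
--             count += 1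
--     return count
-- ===== Notes on version B (the rewrite author's own statement) =====
-- stated objective: faster
-- what changed: Replaces the rebuild-a-counter-per-window scan with a single incremental sliding window: counts and a satisfied-item counter are updated in O(1) as each day enters/leaves the 10-day window, so the |want|-sized all() recheck per window disappears.
import Mathlib
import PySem

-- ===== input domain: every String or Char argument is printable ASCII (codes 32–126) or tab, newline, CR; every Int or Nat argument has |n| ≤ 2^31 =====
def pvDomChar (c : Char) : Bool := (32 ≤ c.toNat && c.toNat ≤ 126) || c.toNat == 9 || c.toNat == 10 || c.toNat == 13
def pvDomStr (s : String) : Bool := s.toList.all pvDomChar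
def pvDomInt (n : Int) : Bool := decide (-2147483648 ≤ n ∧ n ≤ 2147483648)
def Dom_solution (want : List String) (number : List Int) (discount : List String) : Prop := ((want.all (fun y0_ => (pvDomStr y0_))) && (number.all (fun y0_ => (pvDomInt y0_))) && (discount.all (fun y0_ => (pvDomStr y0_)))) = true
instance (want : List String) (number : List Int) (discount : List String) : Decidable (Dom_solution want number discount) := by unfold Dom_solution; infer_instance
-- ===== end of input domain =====

-- B replaces A's per-window counter rebuild + full recheck by one incremental sliding
-- window with a satisfied-item counter (objective: faster; return value only, no mutation).

-- ===== PORT A =====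
def solution (want : List String) (number : List Int) (discount : List String) : Int :=
  -- want_dict = {want[i]: number[i] for i in range(len(want))}
  let want_dict : PySem.Dict String Int :=
    (PySem.List.pyRange 0 want.length 1).foldl (fun d i =>
      match PySem.List.pyGet? want i, PySem.List.pyGet? number i with
      | some w, some v => d.insert w v
      | _, _ => d) PySem.Dict.empty
  -- for i in range(len(discount)-9): …
  (PySem.List.pyRange 0 ((discount.length : Int) - 9) 1).foldl (fun count i =>
    let disc_item := PySem.List.slice discount (some i) (some (i + 10))
    let disc_list : PySem.Dict String Int := disc_item.foldl (fun d item =>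
        if d.contains item then d.insert item (d.getD item 0 + 1) else d.insert item 1)
      PySem.Dict.empty
    if want_dict.keys.all (fun item => decide (disc_list.getD item 0 ≥ want_dict.getD item 0))
    then count + 1 else count) 0

-- ===== PORT B =====
def solution_alt (want : List String) (number : List Int) (discount : List String) : Int :=
  let need : PySem.Dict String Int :=
    (want.zip number).foldl (fun d p => d.insert p.1 p.2) PySem.Dict.empty
  let target : Int := need.size
  let satisfied0 : Int := need.values.foldl (fun s v => if v ≤ 0 then s + 1 else s) 0
  let st :=
    (PySem.List.enumerate discount 0).foldl
      (fun (st : PySem.Dict String Int × Int × Int) jx =>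
        let cnt := st.1
        let satisfied := st.2.1
        let count := st.2.2
        let j := jx.1
        let item := jx.2
        let st1 : PySem.Dict String Int × Int :=
          if need.contains item then
            let c := cnt.getD item 0 + 1
            (cnt.insert item c, if c = need.getD item 0 then satisfied + 1 else satisfied)
          else (cnt, satisfied)
        let st2 : PySem.Dict String Int × Int :=
          if 10 ≤ j then
            match PySem.List.pyGet? discount (j - 10) with
            | some old =>
              if need.contains old then
                let c := st1.1.getD old 0 - 1
                (st1.1.insert old c, if c = need.getD old 0 - 1 then st1.2 - 1 else st1.2)
              else st1
            | none => st1
          else st1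
        (st2.1, st2.2, if 9 ≤ j ∧ st2.2 = target then count + 1 else count))
      (PySem.Dict.empty, satisfied0, 0)
  st.2.2

-- ===== PRECONDITION & SPEC =====
-- Pre_ excludes exactly the inputs where A raises IndexError (number shorter than want).
def Pre_solution (want : List String) (number : List Int) (discount : List String) : Prop :=
  want.length ≤ number.length
instance (want : List String) (number : List Int) (discount : List String) : Decidable (Pre_solution want number discount) := by unfold Pre_solution; infer_instance
def pvWitness_solution : List String × List Int × List String :=
  (["a", "b"], [2, 1], ["a", "a", "b", "c", "a", "b", "a", "b", "c", "a", "b"])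

def Spec_solution (want : List String) (number : List Int) (discount : List String) (out : Int) : Prop := out = solution_alt want number discount
instance (want : List String) (number : List Int) (discount : List String) (out : Int) : Decidable (Spec_solution want number discount out) := by unfold Spec_solution; infer_instance

-- ===== CLAIM (what is proved, stated in full; the proofs are below) =====
def Claim_equal_solution : Prop := ∀ (want : List String) (number : List Int) (discount : List String), Dom_solution want number discount → Pre_solution want number discount → Spec_solution want number discount (solution want number discount)
-- ===== LEMMAS AND PROOFS =====
-- (proof-only helpers: the common characterisation both ports are reduced to)

-- the ≤10-day window ending at day m (exclusive)
def pvWin (discount : List String) (m : Nat) : List String :=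
  (discount.take m).drop (m - 10)

-- number of wanted items whose requirement the window meets (B's 'satisfied')
def pvSat (need : PySem.Dict String Int) (w : List String) : Int :=
  (need.items.map (fun p => if p.2 ≤ (w.count p.1 : Int) then (1 : Int) else 0)).sum

-- "the window starting at day i is good"
def pvP (need : PySem.Dict String Int) (discount : List String) (i : Nat) : Bool :=
  decide (pvSat need (pvWin discount (i + 10)) = (need.size : Int))

def pvNeed (want : List String) (number : List Int) : PySem.Dict String Int :=
  (want.zip number).foldl (fun d p => d.insert p.1 p.2) PySem.Dict.empty

-- the two sub-steps of B's loop body and the body itself, named so the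
-- invariant can be stated about them (definitionally equal to the port's lambda)
def pvStep1 (need cnt : PySem.Dict String Int) (S : Int) (x : String) :
    PySem.Dict String Int × Int :=
  if need.contains x then
    (cnt.insert x (cnt.getD x 0 + 1), if cnt.getD x 0 + 1 = need.getD x 0 then S + 1 else S)
  else (cnt, S)

def pvStep2 (need cnt : PySem.Dict String Int) (S : Int) (y : String) :
    PySem.Dict String Int × Int :=
  if need.contains y then
    (cnt.insert y (cnt.getD y 0 - 1), if cnt.getD y 0 - 1 = need.getD y 0 - 1 then S - 1 else S)
  else (cnt, S)

def pvStepB (need : PySem.Dict String Int) (target : Int) (discount : List String)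
    (st : PySem.Dict String Int × Int × Int) (jx : Int × String) :
    PySem.Dict String Int × Int × Int :=
  let st1 := pvStep1 need st.1 st.2.1 jx.2
  let st2 :=
    if 10 ≤ jx.1 then
      match PySem.List.pyGet? discount (jx.1 - 10) with
      | some old => pvStep2 need st1.1 st1.2 old
      | none => st1
    else st1
  (st2.1, st2.2, if 9 ≤ jx.1 ∧ st2.2 = target then st.2.2 + 1 else st.2.2)

def pvFoldB (need : PySem.Dict String Int) (target satisfied0 : Int) (discount : List String)
    (m : Nat) : PySem.Dict String Int × Int × Int :=
  ((PySem.List.enumerate discount 0).take m).foldl (pvStepB need target discount)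
    (PySem.Dict.empty, satisfied0, 0)

theorem pvWin_zero (l : List String) : pvWin l 0 = [] := rfl

theorem pvWin_take10 (l : List String) (k : Nat) :
    pvWin l (k + 10) = (l.drop k).take 10 := by
  unfold pvWin
  rw [List.drop_take]
  congr 1 <;> omega

theorem pvWin_succ_small (l : List String) (m : Nat) (h : m < 10) (hm : m < l.length) :
    pvWin l (m + 1) = pvWin l m ++ [l[m]] := by
  unfold pvWin
  have h1 : m + 1 - 10 = 0 := by omega
  have h2 : m - 10 = 0 := by omega
  rw [h1, h2, List.drop_zero, List.drop_zero, List.take_succ,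
    List.getElem?_eq_getElem hm]
  rfl

theorem pvWin_shift (l : List String) (m : Nat) (h10 : 10 ≤ m) (hm : m < l.length) :
    pvWin l m ++ [l[m]] = l[m - 10]'(by omega) :: pvWin l (m + 1) := by
  unfold pvWin
  have hlen : (l.take (m + 1)).length = m + 1 := by
    rw [List.length_take]; omega
  have h1 : l.take (m + 1) = l.take m ++ [l[m]] := by
    rw [List.take_succ, List.getElem?_eq_getElem hm]; rfl
  have h2 : (l.take m).drop (m - 10) ++ [l[m]] = (l.take (m + 1)).drop (m - 10) := by
    rw [h1, List.drop_append_of_le_length (by rw [List.length_take]; omega)]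
  rw [h2]
  have h3 : m - 10 < (l.take (m + 1)).length := by omega
  rw [List.drop_eq_getElem_cons h3]
  congr 1
  · rw [List.getElem_take]
  · congr 1; omega

theorem pvNeed_nodup (want : List String) (number : List Int) :
    (pvNeed want number).keys.Nodup := by
  have := PySem.Dict.nodup_keys_foldl_insert_key (want.zip number) (key := Prod.fst)
    (f := fun d p => p.2) PySem.Dict.empty (by simp [PySem.Dict.nodup_keys_empty])
  simpa [pvNeed] using this

theorem pvMem_items_iff (need : PySem.Dict String Int) (hn : need.keys.Nodup) (x : String) (v : Int) :
    (x, v) ∈ need.items ↔ need.contains x = true ∧ need.getD x 0 = v := by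
  constructor
  · intro h
    refine ⟨?_, PySem.Dict.getD_of_mem_items _ h hn 0⟩
    have := PySem.Dict.mem_keys_of_mem_items _ h
    rwa [PySem.Dict.contains_iff_mem_keys]
  · rintro ⟨hc, rfl⟩
    have : (need.get? x).isSome := by rw [← PySem.Dict.contains_eq_isSome_get?]; exact hc
    obtain ⟨v', hv⟩ := Option.isSome_iff_exists.mp this
    have hm := PySem.Dict.mem_items_of_get?_eq_some _ hv
    have : need.getD x 0 = v' := PySem.Dict.getD_of_get?_eq_some _ 0 hv
    rw [this]; exact hm

theorem pvSum_shift (l : List (String × Int)) (hn : (l.map Prod.fst).Nodup)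
    (c : String → Int) (x : String) :
    (l.map (fun p => if p.2 ≤ (if p.1 = x then c p.1 + 1 else c p.1) then (1 : Int) else 0)).sum
      = (l.map (fun p => if p.2 ≤ c p.1 then (1 : Int) else 0)).sum
        + (if (x, c x + 1) ∈ l then 1 else 0) := by
  induction l with
  | nil => simp
  | cons p rest ih =>
    simp only [List.map_cons, List.nodup_cons, List.map_map] at hn ⊢
    have ihr := ih hn.2
    by_cases hpx : p.1 = x
    · -- x occurs at the head; it does not occur in rest
      have hxr : ∀ q ∈ rest, q.1 ≠ x := by
        intro q hq h
        apply hn.1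
        rw [hpx, ← h]
        exact List.mem_map_of_mem hq
      have hrest : (rest.map (fun p => if p.2 ≤ (if p.1 = x then c p.1 + 1 else c p.1) then (1 : Int) else 0))
          = rest.map (fun p => if p.2 ≤ c p.1 then (1 : Int) else 0) := by
        apply List.map_congr_left
        intro q hq
        simp [hxr q hq]
      have hmem : ((x, c x + 1) ∈ p :: rest) ↔ p = (x, c x + 1) := by
        constructor
        · intro h
          rcases List.mem_cons.mp h with h | h
          · exact h.symm
          · exact absurd rfl (hxr _ h)
        · intro h; rw [h]; exact List.mem_cons_self
      rw [List.sum_cons, List.sum_cons, hrest]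
      simp only [hmem]
      have hp : p = (p.1, p.2) := rfl
      by_cases he : p.2 = c x + 1
      · have : p = (x, c x + 1) := by rw [hp, hpx, he]
        simp only [this, hpx]
        simp [hpx]
        omega
      · have hne : ¬ p = (x, c x + 1) := fun h => he (by rw [h])
        rw [if_neg hne]
        have h1 : (if p.2 ≤ c x + 1 then (1:Int) else 0) = (if p.2 ≤ c x then (1:Int) else 0) := by
          split_ifs with a b <;> omega
        rw [hpx, if_pos rfl, h1]
        ring
    · have hmem : ((x, c x + 1) ∈ p :: rest) ↔ ((x, c x + 1) ∈ rest) := by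
        constructor
        · intro h
          rcases List.mem_cons.mp h with h | h
          · exact absurd (congrArg Prod.fst h).symm hpx
          · exact h
        · exact List.mem_cons_of_mem p
      rw [List.sum_cons, List.sum_cons]
      simp only [hmem]
      rw [ihr]
      simp only [if_neg hpx]
      ring

theorem pvSat_append (need : PySem.Dict String Int) (hn : need.keys.Nodup) (w : List String) (x : String) :
    pvSat need (w ++ [x]) = pvSat need w
      + (if need.contains x = true ∧ (w.count x : Int) + 1 = need.getD x 0 then 1 else 0) := by
  have hn' : (need.items.map Prod.fst).Nodup := by
    simpa [PySem.Dict.keys] using hn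
  unfold pvSat
  have hc : (need.items.map (fun p => if p.2 ≤ (((w ++ [x]).count p.1 : Nat) : Int) then (1:Int) else 0))
      = need.items.map (fun p => if p.2 ≤ (if p.1 = x then ((w.count p.1 : Nat) : Int) + 1 else ((w.count p.1 : Nat) : Int)) then (1:Int) else 0) := by
    apply List.map_congr_left
    intro p _
    have : (((w ++ [x]).count p.1 : Nat) : Int) = (if p.1 = x then ((w.count p.1 : Nat) : Int) + 1 else ((w.count p.1 : Nat) : Int)) := by
      rw [List.count_append]
      by_cases h : p.1 = x
      · subst h; simp [List.count_singleton]
      · simp [h, List.count_singleton]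
        intro hxp
        exact absurd hxp.symm h
    rw [this]
  rw [hc, pvSum_shift need.items hn' (fun k => ((w.count k : Nat) : Int)) x]
  congr 1
  have hiff : ((x, (w.count x : Int) + 1) ∈ need.items) ↔
      (need.contains x = true ∧ (w.count x : Int) + 1 = need.getD x 0) := by
    rw [pvMem_items_iff need hn]
    constructor
    · rintro ⟨h1, h2⟩; exact ⟨h1, h2.symm⟩
    · rintro ⟨h1, h2⟩; exact ⟨h1, h2.symm⟩
  exact if_congr hiff rfl rfl

theorem pvSat_cons (need : PySem.Dict String Int) (hn : need.keys.Nodup) (y : String) (t : List String) :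
    pvSat need (y :: t) = pvSat need t
      + (if need.contains y = true ∧ (t.count y : Int) + 1 = need.getD y 0 then 1 else 0) := by
  have hn' : (need.items.map Prod.fst).Nodup := by
    simpa [PySem.Dict.keys] using hn
  unfold pvSat
  have hc : (need.items.map (fun p => if p.2 ≤ (((y :: t).count p.1 : Nat) : Int) then (1:Int) else 0))
      = need.items.map (fun p => if p.2 ≤ (if p.1 = y then ((t.count p.1 : Nat) : Int) + 1 else ((t.count p.1 : Nat) : Int)) then (1:Int) else 0) := by
    apply List.map_congr_left
    intro p _
    have : (((y :: t).count p.1 : Nat) : Int) = (if p.1 = y then ((t.count p.1 : Nat) : Int) + 1 else ((t.count p.1 : Nat) : Int)) := by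
      rw [List.count_cons]
      by_cases h : p.1 = y
      · subst h; simp
      · simp [h]
        intro hyp
        exact absurd hyp.symm h
    rw [this]
  rw [hc, pvSum_shift need.items hn' (fun k => ((t.count k : Nat) : Int)) y]
  congr 1
  have hiff : ((y, (t.count y : Int) + 1) ∈ need.items) ↔
      (need.contains y = true ∧ (t.count y : Int) + 1 = need.getD y 0) := by
    rw [pvMem_items_iff need hn]
    constructor
    · rintro ⟨h1, h2⟩; exact ⟨h1, h2.symm⟩
    · rintro ⟨h1, h2⟩; exact ⟨h1, h2.symm⟩
  exact if_congr hiff rfl rfl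

theorem pvSat_eq_size_iff (need : PySem.Dict String Int) (hn : need.keys.Nodup) (w : List String) :
    pvSat need w = (need.size : Int) ↔
      ∀ k ∈ need.keys, need.getD k 0 ≤ (w.count k : Int) := by
  have h1 : pvSat need w = ((need.items.countP (fun p => decide (p.2 ≤ (w.count p.1 : Int)))) : Int) := by
    unfold pvSat
    rw [← PySem.List.sum_map_ite_one_zero (fun p => decide (p.2 ≤ (w.count p.1 : Int))) need.items]
    congr 1
    apply List.map_congr_left
    intro p _
    simp
  rw [h1]
  have hsz : need.size = need.items.length := rfl
  rw [hsz, Int.natCast_inj, List.countP_eq_length]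
  rw [PySem.Dict.items_eq_map_keys need hn 0]
  simp

theorem pvIdxZip (ws : List String) (ns : List Int) (d : PySem.Dict String Int)
    (h : ws.length ≤ ns.length) :
    (List.range ws.length).foldl (fun d k =>
      match ws[k]?, ns[k]? with
      | some w, some v => d.insert w v
      | _, _ => d) d
    = (ws.zip ns).foldl (fun d p => d.insert p.1 p.2) d := by
  induction ws generalizing ns d with
  | nil => simp
  | cons w ws ih =>
    cases ns with
    | nil => simp at h
    | cons n ns =>
      simp only [List.length_cons, List.range_succ_eq_map, List.foldl_cons, List.foldl_map,
        List.zip_cons_cons]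
      simp only [List.getElem?_cons_zero]
      have := ih ns (d.insert w n) (by simpa using h)
      simpa using this

theorem pvDict_eq (want : List String) (number : List Int) (h : want.length ≤ number.length) :
    (PySem.List.pyRange 0 want.length 1).foldl (fun d i =>
      match PySem.List.pyGet? want i, PySem.List.pyGet? number i with
      | some w, some v => d.insert w v
      | _, _ => d) PySem.Dict.empty = pvNeed want number := by
  rw [PySem.List.pyRange_zero_natCast, List.foldl_map]
  unfold pvNeed
  rw [← pvIdxZip want number PySem.Dict.empty h]
  apply PySem.List.foldl_congr_mem
  intro acc k hk
  rw [PySem.List.pyGet?_natCast, PySem.List.pyGet?_natCast]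

theorem pvStep1_snd (need : PySem.Dict String Int) (hn : need.keys.Nodup)
    (cnt : PySem.Dict String Int) (w : List String) (x : String) (S : Int)
    (hcnt : ∀ k, cnt.getD k 0 = if need.contains k then (w.count k : Int) else 0)
    (hS : S = pvSat need w) :
    (pvStep1 need cnt S x).2 = pvSat need (w ++ [x]) := by
  unfold pvStep1
  rw [pvSat_append need hn w x, hS]
  by_cases hx : need.contains x
  · rw [if_pos hx]
    have hc : cnt.getD x 0 = (w.count x : Int) := by rw [hcnt x, if_pos hx]
    simp only [hc]
    by_cases he : (w.count x : Int) + 1 = need.getD x 0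
    · rw [if_pos he, if_pos ⟨hx, he⟩]
    · rw [if_neg he, if_neg (by rintro ⟨_, h⟩; exact he h)]
      ring
  · rw [if_neg hx]
    rw [if_neg (by rintro ⟨h, _⟩; exact hx h)]
    ring

theorem pvStep1_fst (need : PySem.Dict String Int)
    (cnt : PySem.Dict String Int) (w : List String) (x : String) (S : Int)
    (hcnt : ∀ k, cnt.getD k 0 = if need.contains k then (w.count k : Int) else 0) :
    ∀ k, (pvStep1 need cnt S x).1.getD k 0
      = if need.contains k then (((w ++ [x]).count k : Nat) : Int) else 0 := by
  unfold pvStep1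
  intro k
  have hcount : ∀ j : String, ((w ++ [x]).count j : Nat) = w.count j + (if x = j then 1 else 0) := by
    intro j
    rw [List.count_append, List.count_singleton]
    by_cases h : x = j <;> simp [h]
  by_cases hx : need.contains x
  · rw [if_pos hx]
    by_cases hk : k = x
    · subst hk
      simp only [PySem.Dict.getD_insert, if_pos rfl, if_pos hx, hcnt k, hcount k]
      push_cast
      simp
    · simp only [PySem.Dict.getD_insert, if_neg hk]
      rw [hcnt k, hcount k]
      have : ¬ x = k := fun h => hk h.symm
      rw [if_neg this]
      simp
  · rw [if_neg hx]
    simp only [hcnt k, hcount k]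
    by_cases hk : need.contains k
    · rw [if_pos hk, if_pos hk]
      have : ¬ x = k := by
        intro h; subst h; exact hx hk
      rw [if_neg this]
      simp
    · rw [if_neg hk, if_neg hk]

theorem pvStep2_snd (need : PySem.Dict String Int) (hn : need.keys.Nodup)
    (cnt : PySem.Dict String Int) (y : String) (t : List String) (S : Int)
    (hcnt : ∀ k, cnt.getD k 0 = if need.contains k then ((y :: t).count k : Int) else 0)
    (hS : S = pvSat need (y :: t)) :
    (pvStep2 need cnt S y).2 = pvSat need t := by
  unfold pvStep2
  rw [pvSat_cons need hn y t] at hS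
  by_cases hy : need.contains y
  · rw [if_pos hy]
    have hc : cnt.getD y 0 = ((t.count y : Int)) + 1 := by
      rw [hcnt y, if_pos hy, List.count_cons]
      simp
    simp only [hc]
    by_cases he : (t.count y : Int) + 1 = need.getD y 0
    · rw [if_pos (by omega), hS, if_pos ⟨hy, he⟩]
      ring
    · rw [if_neg (by omega), hS, if_neg (by rintro ⟨_, h⟩; exact he h)]
      ring
  · rw [if_neg hy]
    rw [hS, if_neg (by rintro ⟨h, _⟩; exact hy h)]
    ring

theorem pvStep2_fst (need : PySem.Dict String Int)
    (cnt : PySem.Dict String Int) (y : String) (t : List String) (S : Int)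
    (hcnt : ∀ k, cnt.getD k 0 = if need.contains k then ((y :: t).count k : Int) else 0) :
    ∀ k, (pvStep2 need cnt S y).1.getD k 0
      = if need.contains k then ((t.count k : Nat) : Int) else 0 := by
  unfold pvStep2
  intro k
  have hcount : ∀ j : String, ((y :: t).count j : Nat) = t.count j + (if y = j then 1 else 0) := by
    intro j
    rw [List.count_cons]
    by_cases h : y = j <;> simp [h]
  by_cases hy : need.contains y
  · rw [if_pos hy]
    by_cases hk : k = y
    · subst hk
      simp only [PySem.Dict.getD_insert, if_pos rfl, if_pos hy, hcnt k, hcount k]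
      push_cast
      simp
    · simp only [PySem.Dict.getD_insert, if_neg hk]
      rw [hcnt k, hcount k]
      have : ¬ y = k := fun h => hk h.symm
      rw [if_neg this]
      simp
  · rw [if_neg hy]
    simp only [hcnt k, hcount k]
    by_cases hk : need.contains k
    · rw [if_pos hk, if_pos hk]
      have : ¬ y = k := by
        intro h; subst h; exact hy hk
      rw [if_neg this]
      simp
    · rw [if_neg hk, if_neg hk]

theorem pvK_step (need : PySem.Dict String Int) (discount : List String) (m : Nat)
    (target S' K : Int) (c0 : Nat)
    (htarget : target = (need.size : Int))
    (hS' : S' = pvSat need (pvWin discount (m + 1)))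
    (hK : K = (c0 : Int)) (hc0 : c0 = (List.range (m - 9)).countP (pvP need discount)) :
    (if 9 ≤ (m : Int) ∧ S' = target then K + 1 else K)
      = (((List.range (m + 1 - 9)).countP (pvP need discount) : Nat) : Int) := by
  by_cases h9 : 9 ≤ m
  · have hidx : m + 1 - 9 = (m - 9) + 1 := by omega
    have hwidx : (m - 9) + 10 = m + 1 := by omega
    rw [hidx, List.range_succ, List.countP_append, List.countP_cons, List.countP_nil]
    have hp : pvP need discount (m - 9) = decide (S' = target) := by
      unfold pvP
      rw [hwidx, ← hS', ← htarget]
    by_cases hsat : S' = target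
    · rw [if_pos ⟨by exact_mod_cast h9, hsat⟩, hp, hK, hc0]
      simp only [hsat, decide_true, zero_add, cond_true]
      push_cast
      ring
    · rw [if_neg (by rintro ⟨_, h⟩; exact hsat h), hp, hK, hc0]
      simp only [hsat, decide_false, zero_add, cond_false]
      push_cast
      ring
  · have h9' : ¬ ((9 : Int) ≤ (m : Int)) := by exact_mod_cast h9
    rw [if_neg (by rintro ⟨h, _⟩; exact h9' h), hK, hc0]
    have hidx : m + 1 - 9 = m - 9 := by omega
    rw [hidx]

theorem pvB_invariant (need : PySem.Dict String Int) (hn : need.keys.Nodup)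
    (discount : List String) (target satisfied0 : Int)
    (htarget : target = (need.size : Int)) (hsat0 : satisfied0 = pvSat need [])
    (m : Nat) (hm : m ≤ discount.length) :
    (∀ k, (pvFoldB need target satisfied0 discount m).1.getD k 0
        = if need.contains k then ((pvWin discount m).count k : Int) else 0)
    ∧ (pvFoldB need target satisfied0 discount m).2.1 = pvSat need (pvWin discount m)
    ∧ (pvFoldB need target satisfied0 discount m).2.2
        = (((List.range (m - 9)).countP (pvP need discount) : Nat) : Int) := by
  induction m with
  | zero =>
    refine ⟨?_, ?_, ?_⟩
    · intro k; simp [pvFoldB, PySem.Dict.getD_empty, pvWin_zero]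
    · simp [pvFoldB, pvWin_zero, hsat0]
    · simp [pvFoldB]
  | succ m ih =>
    have hmn : m < discount.length := by omega
    obtain ⟨hcnt, hS, hK⟩ := ih (by omega)
    set F := pvFoldB need target satisfied0 discount m with hF
    set x := discount[m] with hxdef
    have hstep : pvFoldB need target satisfied0 discount (m + 1)
        = pvStepB need target discount F ((m : Int), x) := by
      rw [hF]
      unfold pvFoldB
      rw [List.take_succ, PySem.List.getElem?_enumerate, List.getElem?_eq_getElem hmn]
      simp [List.foldl_append]
      rw [hxdef]
    set s1 := pvStep1 need F.1 F.2.1 x with hs1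
    have hs1_fst : ∀ k, s1.1.getD k 0
        = if need.contains k then (((pvWin discount m ++ [x]).count k : Nat) : Int) else 0 :=
      pvStep1_fst need F.1 (pvWin discount m) x F.2.1 hcnt
    have hs1_snd : s1.2 = pvSat need (pvWin discount m ++ [x]) :=
      pvStep1_snd need hn F.1 (pvWin discount m) x F.2.1 hcnt hS
    by_cases h10 : 10 ≤ m
    · have hj10 : (10 : Int) ≤ (m : Int) := by exact_mod_cast h10
      have hget : PySem.List.pyGet? discount ((m : Int) - 10)
          = some (discount[m - 10]'(by omega)) := by
        have h : ((m : Int) - 10) = ((m - 10 : Nat) : Int) := by omega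
        rw [h, PySem.List.pyGet?_natCast, List.getElem?_eq_getElem (by omega)]
      set old := discount[m - 10]'(by omega) with holddef
      have hwin := pvWin_shift discount m h10 hmn
      have hmid_fst : ∀ k, s1.1.getD k 0
          = if need.contains k then (((old :: pvWin discount (m + 1)).count k : Nat) : Int) else 0 := by
        intro k; rw [hs1_fst k, hwin]
      have hmid_snd : s1.2 = pvSat need (old :: pvWin discount (m + 1)) := by
        rw [hs1_snd, hwin]
      have hred : pvStepB need target discount F ((m : Int), x)
          = ((pvStep2 need s1.1 s1.2 old).1, (pvStep2 need s1.1 s1.2 old).2,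
              if 9 ≤ (m : Int) ∧ (pvStep2 need s1.1 s1.2 old).2 = target
              then F.2.2 + 1 else F.2.2) := by
        unfold pvStepB
        dsimp only
        rw [if_pos hj10, hget]
      rw [hstep, hred]
      refine ⟨pvStep2_fst need s1.1 old (pvWin discount (m + 1)) s1.2 hmid_fst, ?_, ?_⟩
      · exact pvStep2_snd need hn s1.1 old (pvWin discount (m + 1)) s1.2 hmid_fst hmid_snd
      · exact pvK_step need discount m target _ F.2.2 _ htarget
          (pvStep2_snd need hn s1.1 old (pvWin discount (m + 1)) s1.2 hmid_fst hmid_snd)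
          hK rfl
    · have hj10 : ¬ ((10 : Int) ≤ (m : Int)) := by exact_mod_cast h10
      have hwin : pvWin discount (m + 1) = pvWin discount m ++ [x] :=
        pvWin_succ_small discount m (by omega) hmn
      have hred : pvStepB need target discount F ((m : Int), x)
          = (s1.1, s1.2, if 9 ≤ (m : Int) ∧ s1.2 = target then F.2.2 + 1 else F.2.2) := by
        unfold pvStepB
        dsimp only
        rw [if_neg hj10]
      rw [hstep, hred]
      refine ⟨?_, ?_, ?_⟩
      · intro k; rw [hwin]; exact hs1_fst k
      · rw [hwin]; exact hs1_snd
      · exact pvK_step need discount m target _ F.2.2 _ htarget (by rw [hwin]; exact hs1_snd) hK rfl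

theorem pvSat0 (need : PySem.Dict String Int) :
    need.values.foldl (fun s v => if v ≤ 0 then s + 1 else s) 0 = pvSat need [] := by
  rw [PySem.List.foldl_ite_add_one (fun v => v ≤ 0) need.values 0]
  unfold pvSat
  have h1 : (need.items.map (fun p => if p.2 ≤ ((([] : List String).count p.1 : Nat) : Int) then (1:Int) else 0)).sum
      = (need.items.map (fun p => if (fun p : String × Int => decide (p.2 ≤ 0)) p = true then (1:Int) else 0)).sum := by
    congr 1
    apply List.map_congr_left
    intro p _
    simp
  rw [h1, PySem.List.sum_map_ite_one_zero]
  have h2 : need.values = need.items.map (·.2) := rfl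
  rw [h2, List.countP_map, zero_add]
  rfl

theorem pvCounter_getD (l : List String) (k : String) :
    (l.foldl (fun (d : PySem.Dict String Int) item =>
        if d.contains item then d.insert item (d.getD item 0 + 1) else d.insert item 1)
      PySem.Dict.empty).getD k 0 = ((l.count k : Nat) : Int) := by
  have hcongr : l.foldl (fun (d : PySem.Dict String Int) item =>
        if d.contains item then d.insert item (d.getD item 0 + 1) else d.insert item 1)
      PySem.Dict.empty
      = l.foldl (fun d x => d.insert x (d.getD x 0 + 1)) PySem.Dict.empty := by
    apply PySem.List.foldl_congr_mem
    intro acc x _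
    by_cases h : acc.contains x
    · rw [if_pos h]
    · rw [if_neg h, PySem.Dict.getD_of_not_contains acc 0 (by simpa using h)]
      norm_num
  rw [hcongr, PySem.Dict.getD_foldl_insert_add_one]
  simp

theorem pvB_char (want : List String) (number : List Int) (discount : List String) :
    solution_alt want number discount
      = (((List.range (discount.length - 9)).countP (pvP (pvNeed want number) discount) : Nat) : Int) := by
  obtain ⟨-, -, hK⟩ := pvB_invariant (pvNeed want number) (pvNeed_nodup want number) discount
    ((pvNeed want number).size : Int)
    ((pvNeed want number).values.foldl (fun s v => if v ≤ 0 then s + 1 else s) 0)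
    rfl (pvSat0 (pvNeed want number)) discount.length le_rfl
  rw [← hK]
  have hfull : pvFoldB (pvNeed want number) ((pvNeed want number).size : Int)
      ((pvNeed want number).values.foldl (fun s v => if v ≤ 0 then s + 1 else s) 0)
      discount discount.length
      = (PySem.List.enumerate discount 0).foldl
          (pvStepB (pvNeed want number) ((pvNeed want number).size : Int) discount)
          (PySem.Dict.empty,
            (pvNeed want number).values.foldl (fun s v => if v ≤ 0 then s + 1 else s) 0, 0) := by
    unfold pvFoldB
    rw [← PySem.List.length_enumerate discount 0, List.take_length]
  rw [hfull]
  rfl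

theorem pvA_char (want : List String) (number : List Int) (discount : List String)
    (h : want.length ≤ number.length) :
    solution want number discount
      = (((List.range (discount.length - 9)).countP (pvP (pvNeed want number) discount) : Nat) : Int) := by
  unfold solution
  rw [pvDict_eq want number h]
  set need := pvNeed want number with hneed
  have hnn : need.keys.Nodup := pvNeed_nodup want number
  dsimp only
  rw [PySem.List.foldl_ite_add_one]
  rw [PySem.List.pyRange_one, List.countP_map]
  have htn : ((discount.length : Int) - 9 - 0).toNat = discount.length - 9 := by omega
  rw [htn]
  rw [zero_add]
  congr 1
  apply List.countP_congr
  intro i hi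
  simp only [Function.comp, zero_add]
  have hsl : PySem.List.slice discount (some ((i : Nat) : Int)) (some (((i : Nat) : Int) + 10))
      = pvWin discount (i + 10) := by
    rw [show ((i : Nat) : Int) + 10 = ((i : Nat) : Int) + ((10 : Nat) : Int) by norm_num,
      PySem.List.slice_natCast_add, pvWin_take10]
  rw [hsl]
  unfold pvP
  simp only [decide_eq_true_eq]
  rw [pvSat_eq_size_iff need hnn (pvWin discount (i + 10))]
  constructor
  · intro hall k hk
    have := List.all_eq_true.mp hall k hk
    simp only [pvCounter_getD, decide_eq_true_eq, ge_iff_le] at this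
    exact this
  · intro hall
    apply List.all_eq_true.mpr
    intro k hk
    simp only [pvCounter_getD, decide_eq_true_eq, ge_iff_le]
    exact hall k hk

-- ===== VERDICT (by name: the statement is the Claim_ definition above) =====
theorem solution_spec : Claim_equal_solution := by
  intro want number discount _ hpre
  unfold Spec_solution
  rw [pvA_char want number discount hpre, pvB_char]
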